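-- pv_equiv track=rewrite | github.com/maxwell-ng/degree-projects | text_analysis_app.py | chooseBestAbvsInner
-- ===== SOURCE A (Python) =====
-- def chooseBestAbvsInner(abvs):
--     """
--     Find the abbreviation with the lowest score, for one name's set of abbreviations.
--     If multiple abbvs have the same score, returns all (or none if no abbvs provided).
--     Helper function for chooseBestAbvs().
--
--     returns: list of abbreviations (usually of length 1, but sometimes 0 or 2+)
--     """
--
--     # ideally minv would have been the first element, but a dictionary is unordered so this could have been risky.
--     # for general use it would have been more correct to do it differently but doesn't matter here.
--     minv = 1000000 # there is no no max_int in python but scores cannot be higher than 76 anyway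
--     out = []
--     for abv, score in abvs.items():
--         if (score < minv):
--             # new lower score, replace any old abvs in list
--             out = [abv]
--             minv = score
--         elif (score == minv):
--             # two abvs with same lowest score -> add this one
--             out.append(abv)
--         else:
--             # there is already a lower score
--             pass
--     return out
-- ===== SOURCE B (Python) =====
-- def chooseBestAbvsInner(abvs):
--     """Two-pass: find the minimum score (seeded at 1000000), then collect matching keys."""
--     minv = 1000000
--     for score in abvs.values():
--         minv = min(minv, score)
--     return [abv for abv, score in abvs.items() if score == minv]
-- ===== Notes on version B (the rewrite author's own statement) =====
-- stated objective: simpler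
-- what changed: Replaces A's single scan that tracks the running minimum and rebuilds/resets the output list with two separate passes: one fold computing the minimum score (seeded at 1000000), then one comprehension collecting the keys that attain it.
import Mathlib
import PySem

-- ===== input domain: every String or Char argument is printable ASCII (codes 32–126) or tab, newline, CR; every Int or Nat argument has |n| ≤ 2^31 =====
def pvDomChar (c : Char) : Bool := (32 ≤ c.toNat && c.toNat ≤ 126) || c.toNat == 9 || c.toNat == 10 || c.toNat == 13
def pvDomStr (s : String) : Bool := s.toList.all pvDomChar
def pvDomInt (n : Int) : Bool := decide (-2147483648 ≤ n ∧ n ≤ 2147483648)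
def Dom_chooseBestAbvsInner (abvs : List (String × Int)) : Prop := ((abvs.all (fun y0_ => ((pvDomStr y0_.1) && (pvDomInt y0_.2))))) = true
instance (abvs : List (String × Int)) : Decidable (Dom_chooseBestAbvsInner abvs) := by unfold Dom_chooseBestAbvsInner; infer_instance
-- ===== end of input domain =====

-- B replaces A's single minimum-tracking scan with two passes (fold the minimum, then collect matching keys); objective: simpler.
-- ===== PORT A =====
-- loop over abvs.items(), state = (minv, out), branches in source order
def chooseBestAbvsInner (abvs : List (String × Int)) : List String :=
  (abvs.foldl (fun (st : Int × List String) p =>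
      if p.2 < st.1 then (p.2, [p.1])
      else if p.2 = st.1 then (st.1, st.2 ++ [p.1])
      else st) (1000000, [])).2

-- ===== PORT B =====
-- B: two passes — fold the minimum seeded at 1000000, then collect matching keys
def chooseBestAbvsInner_alt (abvs : List (String × Int)) : List String :=
  let minv := abvs.foldl (fun m p => min m p.2) 1000000
  (abvs.filter (fun p => p.2 == minv)).map (fun p => p.1)

-- ===== PRECONDITION & SPEC =====
def Spec_chooseBestAbvsInner (abvs : List (String × Int)) (out : List String) : Prop := out = chooseBestAbvsInner_alt abvs
instance (abvs : List (String × Int)) (out : List String) : Decidable (Spec_chooseBestAbvsInner abvs out) := by unfold Spec_chooseBestAbvsInner; infer_instance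

-- ===== CLAIM (what is proved, stated in full; the proofs are below) =====
def Claim_equal_chooseBestAbvsInner : Prop := ∀ (abvs : List (String × Int)), Dom_chooseBestAbvsInner abvs → Spec_chooseBestAbvsInner abvs (chooseBestAbvsInner abvs)

-- ===== LEMMAS AND PROOFS =====

-- ===== VERDICT (by name: the statement is the Claim_ definition above) =====

lemma minFold_le (xs : List (String × Int)) (m : Int) :
    xs.foldl (fun m p => min m p.2) m ≤ m := by
  induction xs generalizing m with
  | nil => simp
  | cons h t ih => exact le_trans (ih _) (min_le_left _ _)

lemma loop_eq (xs : List (String × Int)) (m : Int) (out : List String) :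
    xs.foldl (fun (st : Int × List String) p =>
      if p.2 < st.1 then (p.2, [p.1])
      else if p.2 = st.1 then (st.1, st.2 ++ [p.1])
      else st) (m, out)
    = (xs.foldl (fun m p => min m p.2) m,
       (if xs.foldl (fun m p => min m p.2) m < m then [] else out)
         ++ (xs.filter (fun p => p.2 == xs.foldl (fun m p => min m p.2) m)).map (fun p => p.1)) := by
  induction xs generalizing m out with
  | nil => simp
  | cons h t ih =>
    obtain ⟨a, s⟩ := h
    have hM := minFold_le t (min m s)
    by_cases h1 : s < m
    · simp only [List.foldl_cons, if_pos h1]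
      rw [ih]
      have hmin : min m s = s := min_eq_right (le_of_lt h1)
      simp only [hmin] at hM ⊢
      have hlt : t.foldl (fun m p => min m p.2) s < m := lt_of_le_of_lt hM h1
      simp only [if_pos hlt, List.filter_cons]
      by_cases h2 : t.foldl (fun m p => min m p.2) s < s
      · have : ¬ (s == t.foldl (fun m p => min m p.2) s) = true := by
          simp; omega
        simp only [this, if_pos h2]
        simp
      · have heq : t.foldl (fun m p => min m p.2) s = s := le_antisymm hM (not_lt.mp h2)
        simp [heq]
    · by_cases h2 : s = m
      · subst h2
        simp only [List.foldl_cons, lt_irrefl, min_self]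
        simp only [min_self] at hM
        rw [ih]
        by_cases h3 : t.foldl (fun m p => min m p.2) s < s
        · have : ¬ (s == t.foldl (fun m p => min m p.2) s) = true := by simp; omega
          simp [h3, this]
        · have heq : t.foldl (fun m p => min m p.2) s = s := le_antisymm hM (not_lt.mp h3)
          simp [heq]
      · have hgt : m < s := lt_of_le_of_ne (not_lt.mp h1) (fun h => h2 h.symm)
        simp only [List.foldl_cons, if_neg h1, if_neg h2]
        rw [ih]
        have hmin : min m s = m := min_eq_left (le_of_lt hgt)
        simp only [hmin] at hM ⊢
        have : ¬ (s == t.foldl (fun m p => min m p.2) m) = true := by simp; omega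
        simp [this]

theorem chooseBestAbvsInner_spec : Claim_equal_chooseBestAbvsInner := by
  intro abvs _
  unfold Spec_chooseBestAbvsInner chooseBestAbvsInner chooseBestAbvsInner_alt
  rw [loop_eq]
  have := minFold_le abvs 1000000
  by_cases h : abvs.foldl (fun m p => min m p.2) 1000000 < 1000000 <;> simp [h]
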